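-- pv_equiv track=rewrite | github.com/prediction-radar/training-and-prediction | old_radar_training/csv_to_png.py | reflectivity_to_color
-- ===== SOURCE A (Python) =====
-- def reflectivity_to_color(reflectivity):
--     # Define the reflectivity thresholds and corresponding colors
--     reflectivity_colors = [
--         (15, "#00FFFF"),   # Cyan for no rain to light rain (< 15 dBZ)
--         (20, "#00BFFF"),   # Light blue for very light rain (15 - 20 dBZ)
--         (25, "#00FF00"),   # Green for light rain (20 - 25 dBZ)
--         (30, "#ADFF2F"),   # Green-yellow for light to moderate rain (25 - 30 dBZ)
--         (35, "#FFFF00"),   # Yellow for moderate rain (30 - 35 dBZ)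
--         (40, "#FFD700"),   # Gold for moderately heavy rain (35 - 40 dBZ)
--         (45, "#FFA500"),   # Orange for heavy rain (40 - 45 dBZ)
--         (50, "#FF8C00"),   # Dark orange for very heavy rain (45 - 50 dBZ)
--         (55, "#FF4500"),   # Orange-red for intense rain (50 - 55 dBZ)
--         (60, "#FF0000"),   # Red for extremely intense rain (55 - 60 dBZ)
--         (65, "#8B0000"),   # Dark red for violent rain / large hail (60 - 65 dBZ)
--         (70, "#FF00FF"),   # Magenta for extreme hail (65+ dBZ)
--     ]
--
--     for threshold, color in reflectivity_colors:
--         if reflectivity < threshold: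
--             return color, reflectivity < 15  # Return color and transparency flag
--     return "#FFFFFF", False  # Default to white for values beyond the defined range
-- ===== SOURCE B (Python) =====
-- def reflectivity_to_color(reflectivity):
--     thresholds = [15, 20, 25, 30, 35, 40, 45, 50, 55, 60, 65, 70]
--     colors = ["#00FFFF", "#00BFFF", "#00FF00", "#ADFF2F", "#FFFF00", "#FFD700",
--               "#FFA500", "#FF8C00", "#FF4500", "#FF0000", "#8B0000", "#FF00FF"]
--     # binary search: first index i with reflectivity < thresholds[i]
--     lo, hi = 0, len(thresholds)
--     while lo < hi:
--         mid = (lo + hi) // 2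
--         if reflectivity < thresholds[mid]:
--             hi = mid
--         else:
--             lo = mid + 1
--     if lo == len(thresholds):
--         return "#FFFFFF", False
--     return colors[lo], lo == 0
-- ===== Notes on version B (the rewrite author's own statement) =====
-- stated objective: alternative
-- what changed: Replaces A's early-returning linear scan over (threshold, color) pairs with a binary search over a sorted threshold list that yields an index into a parallel color table.
import Mathlib
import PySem

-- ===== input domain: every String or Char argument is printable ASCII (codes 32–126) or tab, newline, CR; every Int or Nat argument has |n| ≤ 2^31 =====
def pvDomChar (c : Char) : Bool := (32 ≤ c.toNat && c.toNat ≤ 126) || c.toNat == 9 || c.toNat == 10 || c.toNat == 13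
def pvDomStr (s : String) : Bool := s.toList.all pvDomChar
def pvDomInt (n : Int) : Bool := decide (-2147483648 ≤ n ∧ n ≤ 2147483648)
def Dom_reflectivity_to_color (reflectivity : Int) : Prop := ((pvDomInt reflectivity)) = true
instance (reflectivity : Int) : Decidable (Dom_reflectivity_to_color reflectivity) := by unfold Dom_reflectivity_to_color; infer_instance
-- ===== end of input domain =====

-- B replaces A's early-returning linear scan with a binary search into parallel threshold/color tables (alternative decomposition, same exact values).

-- ===== PORT A =====
-- the (threshold, color) table of A
def pvTableA : List (Int × String) :=
  [(15, "#00FFFF"), (20, "#00BFFF"), (25, "#00FF00"), (30, "#ADFF2F"),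
   (35, "#FFFF00"), (40, "#FFD700"), (45, "#FFA500"), (50, "#FF8C00"),
   (55, "#FF4500"), (60, "#FF0000"), (65, "#8B0000"), (70, "#FF00FF")]

-- A's for-loop with early return
def pvScanA (reflectivity : Int) : List (Int × String) → String × Bool
  | [] => ("#FFFFFF", false)
  | (threshold, color) :: rest =>
      if reflectivity < threshold then (color, decide (reflectivity < 15))
      else pvScanA reflectivity rest

def reflectivity_to_color (reflectivity : Int) : String × Bool :=
  pvScanA reflectivity pvTableA

-- ===== PORT B =====
def pvThresholds : List Int := [15, 20, 25, 30, 35, 40, 45, 50, 55, 60, 65, 70]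
def pvColors : List String :=
  ["#00FFFF", "#00BFFF", "#00FF00", "#ADFF2F", "#FFFF00", "#FFD700",
   "#FFA500", "#FF8C00", "#FF4500", "#FF0000", "#8B0000", "#FF00FF"]

-- B's while-loop: binary search for the first index with reflectivity < thresholds[i]
def pvBisect (reflectivity : Int) (lo hi : Nat) : Nat :=
  if lo < hi then
    let mid := (lo + hi) / 2
    if reflectivity < pvThresholds.getD mid 0 then pvBisect reflectivity lo mid
    else pvBisect reflectivity (mid + 1) hi
  else lo
termination_by hi - lo
decreasing_by all_goals omega

def reflectivity_to_color_alt (reflectivity : Int) : String × Bool :=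
  let lo := pvBisect reflectivity 0 pvThresholds.length
  if lo = pvThresholds.length then ("#FFFFFF", false)
  else (pvColors.getD lo "", decide (lo = 0))

-- ===== PRECONDITION & SPEC =====
def Spec_reflectivity_to_color (reflectivity : Int) (out : String × Bool) : Prop := out = reflectivity_to_color_alt reflectivity
instance (reflectivity : Int) (out : String × Bool) : Decidable (Spec_reflectivity_to_color reflectivity out) := by unfold Spec_reflectivity_to_color; infer_instance

-- ===== CLAIM (what is proved, stated in full; the proofs are below) =====
def Claim_equal_reflectivity_to_color : Prop := ∀ (reflectivity : Int), Dom_reflectivity_to_color reflectivity → Spec_reflectivity_to_color reflectivity (reflectivity_to_color reflectivity)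

-- ===== LEMMAS AND PROOFS =====

-- ===== VERDICT (by name: the statement is the Claim_ definition above) =====
theorem reflectivity_to_color_spec : Claim_equal_reflectivity_to_color := by
  intro r _
  show reflectivity_to_color r = reflectivity_to_color_alt r
  by_cases h0 : r < 15
  · have hb : pvBisect r 0 12 = 0 := by
      rw [pvBisect.eq_def]; norm_num [pvThresholds]
      rw [if_pos (show r < 45 by omega)]
      rw [pvBisect.eq_def]; norm_num [pvThresholds]
      rw [if_pos (show r < 30 by omega)]
      rw [pvBisect.eq_def]; norm_num [pvThresholds]
      rw [if_pos (show r < 20 by omega)]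
      rw [pvBisect.eq_def]; norm_num [pvThresholds]
      rw [if_pos (show r < 15 by omega)]
      rw [pvBisect.eq_def]; norm_num
    simp [reflectivity_to_color, reflectivity_to_color_alt, pvScanA, pvTableA, pvThresholds, pvColors, hb, show r < 15 by omega]
  by_cases h1 : r < 20
  · have hb : pvBisect r 0 12 = 1 := by
      rw [pvBisect.eq_def]; norm_num [pvThresholds]
      rw [if_pos (show r < 45 by omega)]
      rw [pvBisect.eq_def]; norm_num [pvThresholds]
      rw [if_pos (show r < 30 by omega)]
      rw [pvBisect.eq_def]; norm_num [pvThresholds]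
      rw [if_pos (show r < 20 by omega)]
      rw [pvBisect.eq_def]; norm_num [pvThresholds]
      rw [if_neg (show ¬(r < 15) by omega)]
      rw [pvBisect.eq_def]; norm_num
    simp [reflectivity_to_color, reflectivity_to_color_alt, pvScanA, pvTableA, pvThresholds, pvColors, hb, show ¬(r < 15) by omega, show r < 20 by omega]
  by_cases h2 : r < 25
  · have hb : pvBisect r 0 12 = 2 := by
      rw [pvBisect.eq_def]; norm_num [pvThresholds]
      rw [if_pos (show r < 45 by omega)]
      rw [pvBisect.eq_def]; norm_num [pvThresholds]
      rw [if_pos (show r < 30 by omega)]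
      rw [pvBisect.eq_def]; norm_num [pvThresholds]
      rw [if_neg (show ¬(r < 20) by omega)]
      rw [pvBisect.eq_def]; norm_num [pvThresholds]
      rw [if_pos (show r < 25 by omega)]
      rw [pvBisect.eq_def]; norm_num
    simp [reflectivity_to_color, reflectivity_to_color_alt, pvScanA, pvTableA, pvThresholds, pvColors, hb, show ¬(r < 15) by omega, show ¬(r < 20) by omega, show r < 25 by omega]
  by_cases h3 : r < 30
  · have hb : pvBisect r 0 12 = 3 := by
      rw [pvBisect.eq_def]; norm_num [pvThresholds]
      rw [if_pos (show r < 45 by omega)]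
      rw [pvBisect.eq_def]; norm_num [pvThresholds]
      rw [if_pos (show r < 30 by omega)]
      rw [pvBisect.eq_def]; norm_num [pvThresholds]
      rw [if_neg (show ¬(r < 20) by omega)]
      rw [pvBisect.eq_def]; norm_num [pvThresholds]
      rw [if_neg (show ¬(r < 25) by omega)]
      rw [pvBisect.eq_def]; norm_num
    simp [reflectivity_to_color, reflectivity_to_color_alt, pvScanA, pvTableA, pvThresholds, pvColors, hb, show ¬(r < 15) by omega, show ¬(r < 20) by omega, show ¬(r < 25) by omega, show r < 30 by omega]
  by_cases h4 : r < 35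
  · have hb : pvBisect r 0 12 = 4 := by
      rw [pvBisect.eq_def]; norm_num [pvThresholds]
      rw [if_pos (show r < 45 by omega)]
      rw [pvBisect.eq_def]; norm_num [pvThresholds]
      rw [if_neg (show ¬(r < 30) by omega)]
      rw [pvBisect.eq_def]; norm_num [pvThresholds]
      rw [if_pos (show r < 40 by omega)]
      rw [pvBisect.eq_def]; norm_num [pvThresholds]
      rw [if_pos (show r < 35 by omega)]
      rw [pvBisect.eq_def]; norm_num
    simp [reflectivity_to_color, reflectivity_to_color_alt, pvScanA, pvTableA, pvThresholds, pvColors, hb, show ¬(r < 15) by omega, show ¬(r < 20) by omega, show ¬(r < 25) by omega, show ¬(r < 30) by omega, show r < 35 by omega]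
  by_cases h5 : r < 40
  · have hb : pvBisect r 0 12 = 5 := by
      rw [pvBisect.eq_def]; norm_num [pvThresholds]
      rw [if_pos (show r < 45 by omega)]
      rw [pvBisect.eq_def]; norm_num [pvThresholds]
      rw [if_neg (show ¬(r < 30) by omega)]
      rw [pvBisect.eq_def]; norm_num [pvThresholds]
      rw [if_pos (show r < 40 by omega)]
      rw [pvBisect.eq_def]; norm_num [pvThresholds]
      rw [if_neg (show ¬(r < 35) by omega)]
      rw [pvBisect.eq_def]; norm_num
    simp [reflectivity_to_color, reflectivity_to_color_alt, pvScanA, pvTableA, pvThresholds, pvColors, hb, show ¬(r < 15) by omega, show ¬(r < 20) by omega, show ¬(r < 25) by omega, show ¬(r < 30) by omega, show ¬(r < 35) by omega, show r < 40 by omega]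
  by_cases h6 : r < 45
  · have hb : pvBisect r 0 12 = 6 := by
      rw [pvBisect.eq_def]; norm_num [pvThresholds]
      rw [if_pos (show r < 45 by omega)]
      rw [pvBisect.eq_def]; norm_num [pvThresholds]
      rw [if_neg (show ¬(r < 30) by omega)]
      rw [pvBisect.eq_def]; norm_num [pvThresholds]
      rw [if_neg (show ¬(r < 40) by omega)]
      rw [pvBisect.eq_def]; norm_num
    simp [reflectivity_to_color, reflectivity_to_color_alt, pvScanA, pvTableA, pvThresholds, pvColors, hb, show ¬(r < 15) by omega, show ¬(r < 20) by omega, show ¬(r < 25) by omega, show ¬(r < 30) by omega, show ¬(r < 35) by omega, show ¬(r < 40) by omega, show r < 45 by omega]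
  by_cases h7 : r < 50
  · have hb : pvBisect r 0 12 = 7 := by
      rw [pvBisect.eq_def]; norm_num [pvThresholds]
      rw [if_neg (show ¬(r < 45) by omega)]
      rw [pvBisect.eq_def]; norm_num [pvThresholds]
      rw [if_pos (show r < 60 by omega)]
      rw [pvBisect.eq_def]; norm_num [pvThresholds]
      rw [if_pos (show r < 55 by omega)]
      rw [pvBisect.eq_def]; norm_num [pvThresholds]
      rw [if_pos (show r < 50 by omega)]
      rw [pvBisect.eq_def]; norm_num
    simp [reflectivity_to_color, reflectivity_to_color_alt, pvScanA, pvTableA, pvThresholds, pvColors, hb, show ¬(r < 15) by omega, show ¬(r < 20) by omega, show ¬(r < 25) by omega, show ¬(r < 30) by omega, show ¬(r < 35) by omega, show ¬(r < 40) by omega, show ¬(r < 45) by omega, show r < 50 by omega]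
  by_cases h8 : r < 55
  · have hb : pvBisect r 0 12 = 8 := by
      rw [pvBisect.eq_def]; norm_num [pvThresholds]
      rw [if_neg (show ¬(r < 45) by omega)]
      rw [pvBisect.eq_def]; norm_num [pvThresholds]
      rw [if_pos (show r < 60 by omega)]
      rw [pvBisect.eq_def]; norm_num [pvThresholds]
      rw [if_pos (show r < 55 by omega)]
      rw [pvBisect.eq_def]; norm_num [pvThresholds]
      rw [if_neg (show ¬(r < 50) by omega)]
      rw [pvBisect.eq_def]; norm_num
    simp [reflectivity_to_color, reflectivity_to_color_alt, pvScanA, pvTableA, pvThresholds, pvColors, hb, show ¬(r < 15) by omega, show ¬(r < 20) by omega, show ¬(r < 25) by omega, show ¬(r < 30) by omega, show ¬(r < 35) by omega, show ¬(r < 40) by omega, show ¬(r < 45) by omega, show ¬(r < 50) by omega, show r < 55 by omega]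
  by_cases h9 : r < 60
  · have hb : pvBisect r 0 12 = 9 := by
      rw [pvBisect.eq_def]; norm_num [pvThresholds]
      rw [if_neg (show ¬(r < 45) by omega)]
      rw [pvBisect.eq_def]; norm_num [pvThresholds]
      rw [if_pos (show r < 60 by omega)]
      rw [pvBisect.eq_def]; norm_num [pvThresholds]
      rw [if_neg (show ¬(r < 55) by omega)]
      rw [pvBisect.eq_def]; norm_num
    simp [reflectivity_to_color, reflectivity_to_color_alt, pvScanA, pvTableA, pvThresholds, pvColors, hb, show ¬(r < 15) by omega, show ¬(r < 20) by omega, show ¬(r < 25) by omega, show ¬(r < 30) by omega, show ¬(r < 35) by omega, show ¬(r < 40) by omega, show ¬(r < 45) by omega, show ¬(r < 50) by omega, show ¬(r < 55) by omega, show r < 60 by omega]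
  by_cases h10 : r < 65
  · have hb : pvBisect r 0 12 = 10 := by
      rw [pvBisect.eq_def]; norm_num [pvThresholds]
      rw [if_neg (show ¬(r < 45) by omega)]
      rw [pvBisect.eq_def]; norm_num [pvThresholds]
      rw [if_neg (show ¬(r < 60) by omega)]
      rw [pvBisect.eq_def]; norm_num [pvThresholds]
      rw [if_pos (show r < 70 by omega)]
      rw [pvBisect.eq_def]; norm_num [pvThresholds]
      rw [if_pos (show r < 65 by omega)]
      rw [pvBisect.eq_def]; norm_num
    simp [reflectivity_to_color, reflectivity_to_color_alt, pvScanA, pvTableA, pvThresholds, pvColors, hb, show ¬(r < 15) by omega, show ¬(r < 20) by omega, show ¬(r < 25) by omega, show ¬(r < 30) by omega, show ¬(r < 35) by omega, show ¬(r < 40) by omega, show ¬(r < 45) by omega, show ¬(r < 50) by omega, show ¬(r < 55) by omega, show ¬(r < 60) by omega, show r < 65 by omega]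
  by_cases h11 : r < 70
  · have hb : pvBisect r 0 12 = 11 := by
      rw [pvBisect.eq_def]; norm_num [pvThresholds]
      rw [if_neg (show ¬(r < 45) by omega)]
      rw [pvBisect.eq_def]; norm_num [pvThresholds]
      rw [if_neg (show ¬(r < 60) by omega)]
      rw [pvBisect.eq_def]; norm_num [pvThresholds]
      rw [if_pos (show r < 70 by omega)]
      rw [pvBisect.eq_def]; norm_num [pvThresholds]
      rw [if_neg (show ¬(r < 65) by omega)]
      rw [pvBisect.eq_def]; norm_num
    simp [reflectivity_to_color, reflectivity_to_color_alt, pvScanA, pvTableA, pvThresholds, pvColors, hb, show ¬(r < 15) by omega, show ¬(r < 20) by omega, show ¬(r < 25) by omega, show ¬(r < 30) by omega, show ¬(r < 35) by omega, show ¬(r < 40) by omega, show ¬(r < 45) by omega, show ¬(r < 50) by omega, show ¬(r < 55) by omega, show ¬(r < 60) by omega, show ¬(r < 65) by omega, show r < 70 by omega]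
  have hb : pvBisect r 0 12 = 12 := by
    rw [pvBisect.eq_def]; norm_num [pvThresholds]
    rw [if_neg (show ¬(r < 45) by omega)]
    rw [pvBisect.eq_def]; norm_num [pvThresholds]
    rw [if_neg (show ¬(r < 60) by omega)]
    rw [pvBisect.eq_def]; norm_num [pvThresholds]
    rw [if_neg (show ¬(r < 70) by omega)]
    rw [pvBisect.eq_def]; norm_num
  simp [reflectivity_to_color, reflectivity_to_color_alt, pvScanA, pvTableA, pvThresholds, hb, show ¬(r < 15) by omega, show ¬(r < 20) by omega, show ¬(r < 25) by omega, show ¬(r < 30) by omega, show ¬(r < 35) by omega, show ¬(r < 40) by omega, show ¬(r < 45) by omega, show ¬(r < 50) by omega, show ¬(r < 55) by omega, show ¬(r < 60) by omega, show ¬(r < 65) by omega, show ¬(r < 70) by omega]
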